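-- pv_equiv track=rewrite | github.com/carmichael901230/Leetcode | LeetcodeAlg_easy.py | checkRecord
-- ===== SOURCE A (Python) =====
-- def checkRecord(s):
--     countA = 0
--     for i in range(len(s)):
--         if s[i] == 'A':
--             countA += 1
--         if s[i:i+3] == "LLL":       # no need to worry about out of bounds
--             return False
--     return countA <= 1
-- ===== SOURCE B (Python) =====
-- def checkRecord(s):
--     # Run-length encode s, then check the runs: total 'A' length <= 1, no 'L' run of 3+.
--     runs = []
--     i = 0
--     n = len(s)
--     while i < n:
--         j = i + 1
--         while j < n and s[j] == s[i]:
--             j += 1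
--         runs.append((s[i], j - i))
--         i = j
--     absences = sum(k for c, k in runs if c == 'A')
--     return absences <= 1 and all(k < 3 for c, k in runs if c == 'L')
-- ===== Notes on version B (the rewrite author's own statement) =====
-- stated objective: alternative
-- what changed: B first builds a run-length encoding of the string and then judges the runs (sum of 'A'-run lengths <= 1 and every 'L'-run shorter than 3), instead of A's fused per-index scan comparing a sliding 3-character slice while counting 'A's.
import Mathlib
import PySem

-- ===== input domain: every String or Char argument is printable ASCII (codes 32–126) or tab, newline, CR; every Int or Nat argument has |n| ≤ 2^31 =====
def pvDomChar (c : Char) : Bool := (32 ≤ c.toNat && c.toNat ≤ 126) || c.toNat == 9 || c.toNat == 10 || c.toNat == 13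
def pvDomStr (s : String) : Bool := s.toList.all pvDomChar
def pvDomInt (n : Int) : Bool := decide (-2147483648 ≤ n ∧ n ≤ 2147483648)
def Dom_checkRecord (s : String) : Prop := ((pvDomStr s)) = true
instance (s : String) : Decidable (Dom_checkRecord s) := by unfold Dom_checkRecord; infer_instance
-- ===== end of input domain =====

-- B first run-length encodes the string and then judges the list of runs (total 'A'-run
-- length ≤ 1, no 'L'-run of length ≥ 3), instead of A's fused per-index sliding-window
-- scan (objective: alternative).

-- ===== PORT A =====
-- A scans index i from 0 to len(s)-1, reading s[i] and the window s[i:i+3]; the port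
-- recurses on the suffix s[i:], whose head is s[i] and whose take 3 is s[i:i+3]
-- (exact: i is always in range, and Python's slice clamps just as List.take does).
def checkRecordLoop : List Char → Int → Bool
  | [], countA => decide (countA ≤ 1)
  | c :: rest, countA =>
      let countA := if c == 'A' then countA + 1 else countA
      if (c :: rest).take 3 == ['L', 'L', 'L'] then false
      else checkRecordLoop rest countA

def checkRecord (s : String) : Bool := checkRecordLoop s.toList 0

-- ===== PORT B =====
-- B's outer while loop advances i run by run: each step emits (s[i], run length) and
-- jumps to the first index j with s[j] ≠ s[i]; the port recurses on the suffix s[i:],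
-- where the run covering s[i] is s[i] followed by takeWhile (= s[i]) of the tail and
-- the next suffix is the tail's dropWhile (exact transcription of the index loop).
def runsOf : List Char → List (Char × Int)
  | [] => []
  | c :: rest =>
      (c, 1 + ((rest.takeWhile (fun x => x == c)).length : Int)) ::
        runsOf (rest.dropWhile (fun x => x == c))
  termination_by cs => cs.length
  decreasing_by
    simpa [Nat.lt_succ_iff] using List.length_dropWhile_le (fun x => x == c) rest

def checkRecord_alt (s : String) : Bool :=
  let runs := runsOf s.toList
  -- sum(k for c, k in runs if c == 'A')
  let absences := ((runs.filter (fun r => r.1 == 'A')).map Prod.snd).sum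
  -- absences <= 1 and all(k < 3 for c, k in runs if c == 'L')
  decide (absences ≤ 1) && (runs.filter (fun r => r.1 == 'L')).all (fun r => decide (r.2 < 3))

-- ===== PRECONDITION & SPEC =====
def Spec_checkRecord (s : String) (out : Bool) : Prop := out = checkRecord_alt s
instance (s : String) (out : Bool) : Decidable (Spec_checkRecord s out) := by unfold Spec_checkRecord; infer_instance

-- ===== CLAIM (what is proved, stated in full; the proofs are below) =====
def Claim_equal_checkRecord : Prop := ∀ (s : String), Dom_checkRecord s → Spec_checkRecord s (checkRecord s)

-- ===== LEMMAS AND PROOFS =====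

-- Characterisation of A's loop: it returns false iff 'LLL' occurs in the remaining
-- suffix, and otherwise reports whether the accumulator plus the remaining 'A's stays ≤ 1.
theorem checkRecordLoop_eq (cs : List Char) :
    ∀ countA : Int,
      checkRecordLoop cs countA =
        if ['L', 'L', 'L'] <:+: cs then false
        else decide (countA + (cs.count 'A' : Int) ≤ 1) := by
  induction cs with
  | nil => intro n; simp [checkRecordLoop]
  | cons c rest ih =>
      intro n
      rw [checkRecordLoop]
      by_cases hp : (c :: rest).take 3 = ['L', 'L', 'L']
      · have hpre : ['L', 'L', 'L'] <+: c :: rest := by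
          rw [List.prefix_iff_eq_take]; exact hp.symm
        simp [hp, hpre.isInfix]
      · have hnp : ¬ ['L', 'L', 'L'] <+: c :: rest := by
          rw [List.prefix_iff_eq_take]; exact fun h => hp h.symm
        have hne : ((c :: rest).take 3 == ['L', 'L', 'L']) = false :=
          beq_eq_false_iff_ne.mpr hp
        rw [hne, if_neg (by simp), ih]
        simp only [List.infix_cons_iff, hnp, false_or]
        by_cases hi : ['L', 'L', 'L'] <:+: rest
        · simp [hi]
        · simp only [hi, if_false]
          by_cases hc : c = 'A'
          · subst hc; simp; constructor <;> intro <;> omega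
          · simp [hc]

-- The head run really is a block of equal characters: c :: rest splits as a replicate
-- of c followed by the dropWhile remainder.
theorem run_decomp (c : Char) (rest : List Char) :
    c :: rest =
      List.replicate ((rest.takeWhile (fun x => x == c)).length + 1) c ++
        rest.dropWhile (fun x => x == c) := by
  have ht : rest.takeWhile (fun x => x == c) =
      List.replicate (rest.takeWhile (fun x => x == c)).length c :=
    List.eq_replicate_of_mem (fun x hx => by
      simpa using List.mem_takeWhile_imp hx)
  calc c :: rest = c :: (rest.takeWhile (fun x => x == c) ++ rest.dropWhile (fun x => x == c)) := by
        rw [List.takeWhile_append_dropWhile]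
    _ = _ := by rw [List.replicate_succ, List.cons_append]; rw [← ht]

-- The remainder after a run does not start with the run's character.
theorem dropWhile_head_ne (c : Char) (rest : List Char) (x : Char) (t : List Char)
    (h : rest.dropWhile (fun y => y == c) = x :: t) : x ≠ c := by
  have := List.head_dropWhile_not (fun y => y == c) (l := rest) (by simp [h])
  simpa [h] using this

-- 'LLL' never occurs inside a block of a character other than 'L'.
theorem infix_replicate_ne (c : Char) (hc : c ≠ 'L') (m : Nat) (u : List Char) :
    (['L', 'L', 'L'] <:+: List.replicate m c ++ u) ↔ ['L', 'L', 'L'] <:+: u := by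
  induction m with
  | zero => simp
  | succ k ih =>
      rw [List.replicate_succ, List.cons_append, List.infix_cons_iff, ih]
      have : ¬ ['L', 'L', 'L'] <+: c :: (List.replicate k c ++ u) := by
        intro h
        rcases List.cons_prefix_cons.mp h with ⟨h1, _⟩
        exact hc h1.symm
      simp [this]

-- ['L'] is a prefix only of a list starting with 'L'.
theorem single_L_prefix (u : List Char) (hu : ∀ x t, u = x :: t → x ≠ 'L') :
    ¬ (['L'] <+: u) := by
  intro h
  cases u with
  | nil => simp at h
  | cons x t =>
      rcases List.cons_prefix_cons.mp h with ⟨h1, _⟩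
      exact hu x t rfl h1.symm

-- 'LLL' occurs in an 'L'-block followed by a non-'L' remainder iff the block has
-- length ≥ 3 or it occurs in the remainder.
theorem infix_replicate_L (m : Nat) (u : List Char) (hu : ∀ x t, u = x :: t → x ≠ 'L') :
    (['L', 'L', 'L'] <:+: List.replicate m 'L' ++ u) ↔ 3 ≤ m ∨ ['L', 'L', 'L'] <:+: u := by
  have hL1 : ¬ (['L'] <+: u) := single_L_prefix u hu
  have hL2 : ¬ (['L', 'L'] <+: u) := fun h => hL1 ((by simp : ['L'] <+: ['L', 'L']).trans h)
  have hL3 : ¬ (['L', 'L', 'L'] <+: u) := fun h => hL1 ((by simp : ['L'] <+: ['L', 'L', 'L']).trans h)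
  match m with
  | 0 => simp
  | 1 =>
      simp only [List.replicate_succ, List.replicate_zero, List.cons_append, List.nil_append,
        List.infix_cons_iff]
      have h1 : ¬ ['L', 'L', 'L'] <+: 'L' :: u := by
        intro h
        exact hL2 (List.cons_prefix_cons.mp h).2
      simp [h1]
  | 2 =>
      simp only [List.replicate_succ, List.replicate_zero, List.cons_append, List.nil_append,
        List.infix_cons_iff]
      have h2 : ¬ ['L', 'L'] <+: 'L' :: u := by
        intro h
        exact hL1 (List.cons_prefix_cons.mp h).2
      have h1 : ¬ ['L', 'L', 'L'] <+: 'L' :: 'L' :: u := by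
        intro h
        exact h2 (List.cons_prefix_cons.mp h).2
      have h1' : ¬ ['L', 'L', 'L'] <+: 'L' :: u := by
        intro h
        exact hL2 (List.cons_prefix_cons.mp h).2
      simp [h1, h1']
  | (k+3) =>
      constructor
      · intro _; left; omega
      · intro _
        have hp : ['L', 'L', 'L'] <+: List.replicate (k+3) 'L' ++ u := by
          have he : List.replicate (k+3) 'L' = ['L', 'L', 'L'] ++ List.replicate k 'L' := by
            rw [show k + 3 = 3 + k by omega, List.replicate_add]; rfl
          rw [he, List.append_assoc]
          exact List.prefix_append _ _
        exact hp.isInfix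

-- Sum of the 'A' runs = number of 'A's.
theorem runsOf_A_sum (cs : List Char) :
    (((runsOf cs).filter (fun r => r.1 == 'A')).map Prod.snd).sum = (cs.count 'A' : Int) := by
  induction cs using runsOf.induct with
  | case1 => simp [runsOf]
  | case2 c rest ih =>
      rw [runsOf]
      have hd := run_decomp c rest
      have hcount : (c :: rest).count 'A' =
          (List.replicate ((rest.takeWhile (fun x => x == c)).length + 1) c).count 'A' +
            (rest.dropWhile (fun x => x == c)).count 'A' := by
        conv_lhs => rw [hd]
        rw [List.count_append]
      rw [hcount, List.count_replicate]
      by_cases hA : c = 'A'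
      · subst hA
        simp only [List.filter_cons, BEq.rfl]
        simp
        rw [ih]
        ring
      · have h1 : (c == 'A') = false := beq_eq_false_iff_ne.mpr hA
        have h2 : ('A' == c) = false := beq_eq_false_iff_ne.mpr (Ne.symm hA)
        simp [h1, ih]

-- The 'L' runs are all short iff 'LLL' does not occur.
theorem runsOf_L_all (cs : List Char) :
    (∀ r ∈ runsOf cs, r.1 = 'L' → r.2 < 3) ↔ ¬ (['L', 'L', 'L'] <:+: cs) := by
  induction cs using runsOf.induct with
  | case1 => simp [runsOf]
  | case2 c rest ih =>
      rw [runsOf]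
      have hd := run_decomp c rest
      by_cases hc : c = 'L'
      · subst hc
        have hu : ∀ x t, rest.dropWhile (fun y => y == 'L') = x :: t → x ≠ 'L' :=
          fun x t h => dropWhile_head_ne 'L' rest x t h
        have hinf : (['L', 'L', 'L'] <:+: 'L' :: rest) ↔
            3 ≤ (rest.takeWhile (fun x => x == 'L')).length + 1 ∨
              ['L', 'L', 'L'] <:+: rest.dropWhile (fun x => x == 'L') := by
          conv_lhs => rw [hd]
          exact infix_replicate_L _ _ hu
        rw [hinf]
        push Not
        constructor
        · intro h
          refine ⟨?_, ih.mp (fun r hr => h r (List.mem_cons_of_mem _ hr))⟩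
          have h1 := h ('L', 1 + ((rest.takeWhile (fun x => x == 'L')).length : Int))
            (by simp) rfl
          omega
        · rintro ⟨h1, h2⟩
          intro r hr hL
          rcases List.mem_cons.mp hr with h | h
          · subst h; simp only []; omega
          · exact ih.mpr h2 r h hL
      · have hinf : (['L', 'L', 'L'] <:+: c :: rest) ↔
            ['L', 'L', 'L'] <:+: rest.dropWhile (fun x => x == c) := by
          conv_lhs => rw [hd]
          exact infix_replicate_ne c hc _ _
        rw [hinf, ← ih]
        simp [hc]

-- ===== VERDICT (by name: the statement is the Claim_ definition above) =====
theorem checkRecord_spec : Claim_equal_checkRecord := by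
  intro s _
  show checkRecord s = checkRecord_alt s
  rw [checkRecord, checkRecord_alt, checkRecordLoop_eq]
  by_cases hi : ['L', 'L', 'L'] <:+: s.toList
  · rw [if_pos hi]
    have hex : ¬ ∀ r ∈ runsOf s.toList, r.1 = 'L' → r.2 < 3 :=
      fun h => ((runsOf_L_all s.toList).mp h) hi
    push Not at hex
    obtain ⟨r, hr, hL, h3⟩ := hex
    have hall : ((runsOf s.toList).filter (fun r => r.1 == 'L')).all
        (fun r => decide (r.2 < 3)) = false := by
      rw [List.all_eq_false]
      exact ⟨r, List.mem_filter.mpr ⟨hr, by simp [hL]⟩, by simp [h3]⟩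
    simp [hall]
  · rw [if_neg hi]
    have hall : ((runsOf s.toList).filter (fun r => r.1 == 'L')).all
        (fun r => decide (r.2 < 3)) = true := by
      rw [List.all_eq_true]
      intro r hr
      rcases List.mem_filter.mp hr with ⟨hr', hq⟩
      exact decide_eq_true ((runsOf_L_all s.toList).mpr hi r hr' (by simpa using hq))
    simp only [hall, Bool.and_true, runsOf_A_sum]
    exact decide_eq_decide.mpr (by omega)
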